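-- pv_equiv track=rewrite | github.com/Dharmendraverma10/python- | bytecalculator.py | calculate_byte_size
-- ===== SOURCE A (Python) =====
-- def calculate_byte_size(line):
--     '''calculates and returns the total byte size '''
--     temp_str_int=''
--     for character in line[-2:0:-1]:
--         if character.isdigit():
--             temp_str_int=temp_str_int+character
--             flag=True
--         else:
--             break
--
--     temp_str_int=temp_str_int[::-1]
--     if temp_str_int.isdigit():
--         return int(temp_str_int)
--     else:
--         return 0
-- ===== SOURCE B (Python) =====
-- def calculate_byte_size(line):
--     '''calculates and returns the total byte size '''
--     cur = ''
--     for ch in line[1:-1]: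
--         if ch.isdigit():
--             cur = cur + ch
--         else:
--             cur = ''
--     return int(cur) if cur else 0
-- ===== Notes on version B (the rewrite author's own statement) =====
-- stated objective: simpler
-- what changed: Replaces A's reverse scan over line[-2:0:-1] with break plus a final reverse-and-isdigit recheck by a single forward pass over line[1:-1] that accumulates digits and resets on any non-digit, returning int(cur) if cur else 0.
import Mathlib
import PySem

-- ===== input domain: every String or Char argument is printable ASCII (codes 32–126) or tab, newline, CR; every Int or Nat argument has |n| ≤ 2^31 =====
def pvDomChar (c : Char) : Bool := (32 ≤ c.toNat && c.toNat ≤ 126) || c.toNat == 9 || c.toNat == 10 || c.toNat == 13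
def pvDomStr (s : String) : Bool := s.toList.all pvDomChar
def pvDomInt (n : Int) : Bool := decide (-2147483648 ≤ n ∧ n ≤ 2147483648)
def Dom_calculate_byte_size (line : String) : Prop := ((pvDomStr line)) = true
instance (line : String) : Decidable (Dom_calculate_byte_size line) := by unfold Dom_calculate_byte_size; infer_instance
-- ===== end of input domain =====

-- B replaces A's reverse scan (with break and a final reverse+isdigit recheck) by a single
-- forward digit-collecting pass over line[1:-1] that resets on non-digits; objective: simpler.
-- (On ASCII inputs int() is guarded by isdigit / non-emptiness, so both programs are total on Dom;
-- the ports' `.getD` defaults below are never reached on Dom.)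

-- ===== PORT A =====
-- the `for … break` loop: temp_str_int accumulator, stop at the first non-digit
def pvALoop : List Char → List Char → List Char
  | [], acc => acc
  | c :: rest, acc =>
      if PySem.Chars.isdigit c then pvALoop rest (acc ++ [c]) else acc

def calculate_byte_size (line : String) : Int :=
  -- line[-2:0:-1]; step -1 never makes slice? none, so .getD [] is never reached
  let it := (PySem.List.slice? line.toList (some (-2)) (some 0) (-1)).getD []
  let temp := pvALoop it []
  -- temp_str_int[::-1]; again step -1 never yields none
  let temp := (PySem.List.slice? temp none none (-1)).getD []
  if PySem.Chars.strIsdigit temp then (PySem.Int.ofChars? temp).getD 0 else 0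

-- ===== PORT B =====
-- forward pass: append digits to cur, reset cur on any non-digit
def pvBLoop : List Char → List Char → List Char
  | [], cur => cur
  | c :: rest, cur =>
      if PySem.Chars.isdigit c then pvBLoop rest (cur ++ [c]) else pvBLoop rest []

def calculate_byte_size_alt (line : String) : Int :=
  let s := PySem.List.slice line.toList (some 1) (some (-1))   -- line[1:-1]
  let cur := pvBLoop s []
  if cur.isEmpty then 0 else (PySem.Int.ofChars? cur).getD 0   -- int(cur) if cur else 0

-- ===== PRECONDITION & SPEC =====
def Spec_calculate_byte_size (line : String) (out : Int) : Prop := out = calculate_byte_size_alt line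
instance (line : String) (out : Int) : Decidable (Spec_calculate_byte_size line out) := by unfold Spec_calculate_byte_size; infer_instance

-- ===== CLAIM (what is proved, stated in full; the proofs are below) =====
def Claim_equal_calculate_byte_size : Prop := ∀ (line : String), Dom_calculate_byte_size line → Spec_calculate_byte_size line (calculate_byte_size line)

-- ===== LEMMAS AND PROOFS =====

-- the indices picked by xs[-2:0:-1]: positions m, m-1, …, 1
theorem pv_idx (l : List Char) : ∀ m, m < l.length →
    List.filterMap (fun k : Nat => l[((m:Int) + -(k:Int)).toNat]?) (List.range m)
    = ((l.take (m+1)).drop 1).reverse := by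
  intro m
  induction m with
  | zero => simp
  | succ m ih =>
    intro hm
    rw [List.range_succ_eq_map, List.filterMap_cons]
    have h0 : (((m+1:Nat):Int) + -((0:Nat):Int)).toNat = m+1 := by omega
    rw [h0, List.getElem?_eq_getElem hm, List.filterMap_map]
    have hstep : List.filterMap ((fun k : Nat => l[(((m+1:Nat):Int) + -((k:Nat):Int)).toNat]?) ∘ Nat.succ) (List.range m)
        = List.filterMap (fun k : Nat => l[((m:Int) + -(k:Int)).toNat]?) (List.range m) := by
      apply List.filterMap_congr
      intro k _
      simp only [Function.comp_apply]
      have he : (((m+1:Nat):Int) + -((Nat.succ k : Nat):Int)) = ((m:Int) + -(k:Int)) := by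
        push_cast; ring
      rw [he]
    rw [Function.comp_def] at hstep ⊢
    rw [hstep, ih (by omega)]
    show l[m+1] :: (List.drop 1 (List.take (m+1) l)).reverse = _
    conv_rhs => rw [List.take_add_one, List.getElem?_eq_getElem hm]
    rw [Option.toList_some, List.drop_append_of_le_length (by simp; omega)]
    simp

-- xs[-2:0:-1] is the reversed middle of xs
theorem pv_slice_rev (xs : List Char) :
    PySem.List.slice? xs (some (-2)) (some 0) (-1)
    = some ((xs.drop 1).dropLast.reverse) := by
  match xs with
  | [] => rfl
  | [a] => rfl
  | a :: b :: rest =>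
    simp only [PySem.List.slice?, PySem.List.sliceIndices]
    norm_num
    have hmax : max (-2 + ((rest.length:Int) + 1 + 1)) (-1) = (rest.length:Int) := by omega
    rw [hmax]
    have hcount : (if 2 + min 0 ((rest.length:Int) + 1) ≤ (rest.length:Int) + 1 ∨ (rest.length:Int) + 1 < -1 then ((rest.length:Int) - min 0 ((rest.length:Int) + 1)).toNat else 0) = rest.length := by
      split_ifs <;> omega
    rw [hcount, pv_idx _ _ (by simp)]
    simp [List.dropLast_eq_take]

-- xs[1:-1] is the middle of xs
theorem pv_slice_mid (xs : List Char) :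
    PySem.List.slice xs (some 1) (some (-1)) = (xs.drop 1).dropLast := by
  cases xs with
  | nil => rfl
  | cons a l =>
    simp [PySem.List.slice, PySem.List.clampIdx, List.dropLast_eq_take]
    split_ifs <;> omega

theorem pvALoop_eq (xs acc : List Char) :
    pvALoop xs acc = acc ++ xs.takeWhile PySem.Chars.isdigit := by
  induction xs generalizing acc with
  | nil => simp [pvALoop]
  | cons c rest ih =>
      by_cases h : PySem.Chars.isdigit c
      · simp [pvALoop, h, ih]
      · simp [pvALoop, h]

theorem pv_takeWhile_append_not {p : Char → Bool} {c : Char} (hc : p c = false)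
    (xs ys : List Char) :
    (xs ++ c :: ys).takeWhile p = xs.takeWhile p := by
  induction xs with
  | nil => simp [hc]
  | cons x xs ih =>
      by_cases h : p x
      · simp [h, ih]
      · simp [h]

theorem pvBLoop_eq (xs cur : List Char) (h : cur.all PySem.Chars.isdigit) :
    pvBLoop xs cur = ((cur ++ xs).reverse.takeWhile PySem.Chars.isdigit).reverse := by
  induction xs generalizing cur with
  | nil =>
      simp only [pvBLoop, List.append_nil]
      rw [List.takeWhile_eq_self_iff.mpr]
      · simp
      · intro x hx
        exact (List.all_eq_true.mp h) x (List.mem_reverse.mp hx)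
  | cons c rest ih =>
      by_cases hc : PySem.Chars.isdigit c
      · rw [pvBLoop, if_pos hc, ih (cur ++ [c]) (by simp_all)]
        simp
      · rw [pvBLoop, if_neg hc, ih [] (by simp)]
        have : (cur ++ c :: rest).reverse = rest.reverse ++ c :: cur.reverse := by simp
        rw [this, pv_takeWhile_append_not (by simpa using hc)]
        simp

-- ===== VERDICT (by name: the statement is the Claim_ definition above) =====
theorem calculate_byte_size_spec : Claim_equal_calculate_byte_size := by
  intro line _
  unfold Spec_calculate_byte_size calculate_byte_size calculate_byte_size_alt
  rw [pv_slice_rev, pv_slice_mid]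
  set s := (line.toList.drop 1).dropLast with hs
  simp only [Option.getD_some]
  rw [pvALoop_eq, pvBLoop_eq _ _ (by simp), List.nil_append, List.nil_append,
      PySem.List.slice?_none_none_neg_one, Option.getD_some]
  set t := (s.reverse.takeWhile PySem.Chars.isdigit).reverse with ht
  have hall : t.all PySem.Chars.isdigit = true := by
    simp only [ht, List.all_eq_true]
    intro x hx
    exact List.mem_takeWhile_imp (List.mem_reverse.mp hx)
  cases te : t.isEmpty
  · have : PySem.Chars.strIsdigit t = true := by
      simp [PySem.Chars.strIsdigit, te, hall]
    rw [if_pos this, if_neg (by simp)]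
  · have : PySem.Chars.strIsdigit t = false := by
      simp [PySem.Chars.strIsdigit, te]
    simp [this]
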